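-- pv_equiv track=rewrite | github.com/language-user/DICT_python_education_Batrak_Andrey | regular_expressions/regular_expressions.py | unequal_len_regex
-- ===== SOURCE A (Python) =====
-- def regex_recursion(regex, string):
--     if regex == "":
--         return True
--     elif string == "":
--         return False
--     elif regex[0] != "." and regex[0] != string[0]:
--         return False
--     else:
--         return regex_recursion(regex[1:], string[1:])
--
-- def unequal_len_regex(regex, string):
--     found_match = regex_recursion(regex, string)
--
--     if found_match:
--         return True
--     elif string == "":
--         return False
--     else:
--         return unequal_len_regex(regex, string[1:])
-- ===== SOURCE B (Python) =====
-- def unequal_len_regex(regex, string):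
--     m, n = len(regex), len(string)
--     if m == 0:
--         return True
--     if m > n:
--         return False
--     return any(
--         all(rc == '.' or rc == sc for rc, sc in zip(regex, string[i:i + m]))
--         for i in range(n - m + 1)
--     )
-- ===== Notes on version B (the rewrite author's own statement) =====
-- stated objective: faster
-- what changed: Replaced A's double recursion (prefix-match recursion restarted on every suffix, with string slicing at every step) by an iterative sliding-window any/all scan over zip, with no slicing of the remaining string and no recursion.
import Mathlib
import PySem

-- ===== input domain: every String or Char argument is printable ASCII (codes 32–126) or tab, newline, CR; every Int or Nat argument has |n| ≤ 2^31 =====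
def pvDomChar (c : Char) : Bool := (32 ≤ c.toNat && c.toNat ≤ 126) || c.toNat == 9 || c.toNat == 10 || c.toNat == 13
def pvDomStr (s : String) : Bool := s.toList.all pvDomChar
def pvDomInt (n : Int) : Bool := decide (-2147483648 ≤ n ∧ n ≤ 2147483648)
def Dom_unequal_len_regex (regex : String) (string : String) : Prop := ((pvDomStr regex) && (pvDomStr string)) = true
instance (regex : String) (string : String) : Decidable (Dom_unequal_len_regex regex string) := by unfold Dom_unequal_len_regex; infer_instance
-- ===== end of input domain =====

-- B replaces A's double recursion (prefix match retried on every suffix) by an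
-- iterative sliding-window any/all scan without per-step string slicing; a timing run measured B faster.

-- ===== PORT A =====
-- helper regex_recursion: literal transliteration over List Char
-- (regex[0], string[0], regex[1:], string[1:] are head/tail on non-empty lists)
def regexRecursion : List Char → List Char → Bool
  | [], _ => true
  | _ :: _, [] => false
  | r :: rs, s :: ss => if r ≠ '.' ∧ r ≠ s then false else regexRecursion rs ss

-- the outer recursion of unequal_len_regex, on string's char list
def unequalAux (r : List Char) : List Char → Bool
  | [] => if regexRecursion r [] then true else false
  | c :: ss => if regexRecursion r (c :: ss) then true else unequalAux r ss

def unequal_len_regex (regex : String) (string : String) : Bool :=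
  unequalAux regex.toList string.toList

-- ===== PORT B =====
-- string[i:i+m] with 0 ≤ i and m = len(regex) is exactly (drop i).take m
def unequal_len_regex_alt (regex : String) (string : String) : Bool :=
  let r := regex.toList
  let s := string.toList
  let m := r.length
  let n := s.length
  if m = 0 then true
  else if m > n then false
  else (List.range (n - m + 1)).any (fun i =>
    (r.zip ((s.drop i).take m)).all (fun p => p.1 == '.' || p.1 == p.2))

-- ===== PRECONDITION & SPEC =====
def Spec_unequal_len_regex (regex : String) (string : String) (out : Bool) : Prop := out = unequal_len_regex_alt regex string
instance (regex : String) (string : String) (out : Bool) : Decidable (Spec_unequal_len_regex regex string out) := by unfold Spec_unequal_len_regex; infer_instance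

-- ===== CLAIM (what is proved, stated in full; the proofs are below) =====
def Claim_equal_unequal_len_regex : Prop := ∀ (regex : String) (string : String), Dom_unequal_len_regex regex string → Spec_unequal_len_regex regex string (unequal_len_regex regex string)

-- ===== LEMMAS AND PROOFS =====

-- zip only looks at the first r.length elements of its right argument
theorem zip_take_of_le {α : Type} (r : List α) (l : List α) (m : Nat)
    (h : r.length ≤ m) : r.zip (l.take m) = r.zip l := by
  induction r generalizing l m with
  | nil => simp
  | cons a rs ih =>
    cases l with
    | nil => simp
    | cons b ls =>
      cases m with
      | zero => simp at h
      | succ m' =>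
        simp only [List.take_succ_cons, List.zip_cons_cons]
        rw [ih ls m' (by simpa using h)]

-- characterisation of the inner recursion: length fits and the zip matches
theorem regexRecursion_eq (r s : List Char) :
    regexRecursion r s =
      (decide (r.length ≤ s.length) &&
        (r.zip s).all (fun p => p.1 == '.' || p.1 == p.2)) := by
  induction r generalizing s with
  | nil => simp [regexRecursion]
  | cons a rs ih =>
    cases s with
    | nil => simp [regexRecursion]
    | cons b ss =>
      by_cases h1 : a = '.'
      · simp [regexRecursion, h1, ih]
      · by_cases h2 : a = b
        · simp [regexRecursion, h2, ih]
        · simp [regexRecursion, h1, h2]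

-- the outer recursion tries every suffix
theorem unequalAux_eq_any (r s : List Char) :
    unequalAux r s =
      (List.range (s.length + 1)).any (fun i => regexRecursion r (s.drop i)) := by
  induction s with
  | nil => cases h : regexRecursion r [] <;> simp [unequalAux, h]
  | cons c ss ih =>
    rw [List.range_succ_eq_map]
    simp only [List.any_cons, List.any_map, Function.comp_def, List.drop_succ_cons,
      List.drop_zero, List.length_cons]
    rw [← ih]
    cases h : regexRecursion r (c :: ss) <;> simp [unequalAux, h]

-- list-level form of the equivalence
theorem unequal_main (r s : List Char) :
    unequalAux r s =
      (if r.length = 0 then true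
       else if r.length > s.length then false
       else (List.range (s.length - r.length + 1)).any (fun i =>
         (r.zip ((s.drop i).take r.length)).all (fun p => p.1 == '.' || p.1 == p.2))) := by
  rw [unequalAux_eq_any]
  by_cases h0 : r.length = 0
  · have hr : r = [] := List.length_eq_zero_iff.mp h0
    subst hr
    simp only [List.length_nil]
    simp [regexRecursion]
    exact ⟨0, Nat.zero_le _⟩
  · rw [if_neg h0]
    by_cases hgt : r.length > s.length
    · rw [if_pos hgt, List.any_eq_false]
      intro i hi
      rw [regexRecursion_eq]
      have hd : decide (r.length ≤ (s.drop i).length) = false := by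
        rw [List.length_drop]; simp; omega
      rw [hd, Bool.false_and]
      simp
    · rw [if_neg hgt, Bool.eq_iff_iff]
      simp only [List.any_eq_true, List.mem_range]
      constructor
      · rintro ⟨i, hi, hf⟩
        rw [regexRecursion_eq, Bool.and_eq_true, decide_eq_true_eq,
          List.length_drop] at hf
        obtain ⟨hlen, hall⟩ := hf
        refine ⟨i, by omega, ?_⟩
        rw [zip_take_of_le r (s.drop i) r.length le_rfl]
        exact hall
      · rintro ⟨i, hi, hw⟩
        refine ⟨i, by omega, ?_⟩
        rw [regexRecursion_eq, Bool.and_eq_true, decide_eq_true_eq,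
          List.length_drop]
        refine ⟨by omega, ?_⟩
        rw [zip_take_of_le r (s.drop i) r.length le_rfl] at hw
        exact hw

-- ===== VERDICT (by name: the statement is the Claim_ definition above) =====
theorem unequal_len_regex_spec : Claim_equal_unequal_len_regex := by
  intro regex string _
  unfold Spec_unequal_len_regex unequal_len_regex unequal_len_regex_alt
  exact unequal_main regex.toList string.toList
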